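-- pv_equiv track=rewrite | github.com/benquick123/code-profiling | code/batch-2/vse-naloge-brez-testov/DN7-M-047.py | varen_premik
-- ===== SOURCE A (Python) =====
-- def varen_premik(x0, y0, x1, y1, mine):
--     """
--     Vrni `True`, če je pomik z (x0, y0) and (x1, y1) varen, `False`, če ni.
--
--     Args:
--         x0 (int): koordinata x začetnega polja
--         y0 (int): koordinata y začetnega polja
--         x1 (int): koordinata x končnega polja
--         y1 (int): koordinata y končnega polja
--         mine (set of tuple of int): koordinate min
--
--     Returns:
--         bool: `True`, če je premik varen, `False`, če ni.
--     """
--     varno = True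
--     if x0 == x1:
--         if y0 < y1:
--             min = y0
--             max = y1 + 1
--             for y in range(min, max):
--                 if (x0, y) in mine:
--                     varno = False
--         else:
--             min = y1
--             max = y0 + 1
--             for y in range(min, max):
--                 if (x0, y) in mine:
--                     varno = False
--     else:
--         if x0 < x1:
--             min = x0
--             max = x1 + 1
--             for x in range(min, max):
--                 if (x, y0) in mine:
--                     varno = False
--         else:
--             min = x1
--             max = x0 + 1
--             for x in range(min, max):
--                 if (x, y0) in mine:
--                     varno = False
--
--     return varno
-- ===== SOURCE B (Python) =====
-- def varen_premik(x0, y0, x1, y1, mine):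
--     if x0 == x1:
--         lo, hi = (y0, y1) if y0 < y1 else (y1, y0)
--         return not any(m[0] == x0 and lo <= m[1] <= hi for m in mine)
--     lo, hi = (x0, x1) if x0 < x1 else (x1, x0)
--     return not any(m[1] == y0 and lo <= m[0] <= hi for m in mine)
-- ===== Notes on version B (the rewrite author's own statement) =====
-- stated objective: faster
-- what changed: Instead of scanning every cell of the path and testing set membership per cell, B computes the inclusive coordinate range once and makes a single pass over the mines, so the cost depends on the number of mines rather than the path length.
import Mathlib
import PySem

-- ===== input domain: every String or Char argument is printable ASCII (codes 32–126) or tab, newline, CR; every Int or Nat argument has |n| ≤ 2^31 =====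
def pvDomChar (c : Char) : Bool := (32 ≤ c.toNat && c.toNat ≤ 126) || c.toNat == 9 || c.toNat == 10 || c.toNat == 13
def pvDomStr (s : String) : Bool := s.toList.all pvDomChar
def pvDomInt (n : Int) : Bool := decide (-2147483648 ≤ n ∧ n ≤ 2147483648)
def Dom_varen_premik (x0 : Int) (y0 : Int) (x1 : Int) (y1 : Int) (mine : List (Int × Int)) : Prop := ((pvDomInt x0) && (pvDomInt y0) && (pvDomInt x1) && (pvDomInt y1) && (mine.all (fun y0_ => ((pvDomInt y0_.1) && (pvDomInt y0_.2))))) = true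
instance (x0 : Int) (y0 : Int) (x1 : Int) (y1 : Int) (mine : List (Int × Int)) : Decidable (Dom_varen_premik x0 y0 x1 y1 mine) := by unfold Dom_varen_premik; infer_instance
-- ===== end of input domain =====

-- B iterates once over the mine set with an inclusive coordinate-range test instead of
-- scanning every cell of the path, so the cost depends on |mine| rather than the path length.

-- ===== PORT A =====
-- A scans each coordinate of the path with range() and flips `varno` to False on a hit.
def varen_premik (x0 : Int) (y0 : Int) (x1 : Int) (y1 : Int) (mine : List (Int × Int)) : Bool :=
  if x0 == x1 then
    if y0 < y1 then
      (PySem.List.pyRange y0 (y1 + 1) 1).foldl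
        (fun varno y => if mine.contains (x0, y) then false else varno) true
    else
      (PySem.List.pyRange y1 (y0 + 1) 1).foldl
        (fun varno y => if mine.contains (x0, y) then false else varno) true
  else
    if x0 < x1 then
      (PySem.List.pyRange x0 (x1 + 1) 1).foldl
        (fun varno x => if mine.contains (x, y0) then false else varno) true
    else
      (PySem.List.pyRange x1 (x0 + 1) 1).foldl
        (fun varno x => if mine.contains (x, y0) then false else varno) true

-- ===== PORT B =====
def varen_premik_alt (x0 : Int) (y0 : Int) (x1 : Int) (y1 : Int) (mine : List (Int × Int)) : Bool :=
  if x0 == x1 then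
    let lo := if y0 < y1 then y0 else y1
    let hi := if y0 < y1 then y1 else y0
    !(mine.any (fun m => m.1 == x0 && decide (lo ≤ m.2) && decide (m.2 ≤ hi)))
  else
    let lo := if x0 < x1 then x0 else x1
    let hi := if x0 < x1 then x1 else x0
    !(mine.any (fun m => m.2 == y0 && decide (lo ≤ m.1) && decide (m.1 ≤ hi)))

-- ===== PRECONDITION & SPEC =====
def Spec_varen_premik (x0 : Int) (y0 : Int) (x1 : Int) (y1 : Int) (mine : List (Int × Int)) (out : Bool) : Prop := out = varen_premik_alt x0 y0 x1 y1 mine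
instance (x0 : Int) (y0 : Int) (x1 : Int) (y1 : Int) (mine : List (Int × Int)) (out : Bool) : Decidable (Spec_varen_premik x0 y0 x1 y1 mine out) := by unfold Spec_varen_premik; infer_instance

-- ===== CLAIM (what is proved, stated in full; the proofs are below) =====
def Claim_equal_varen_premik : Prop := ∀ (x0 : Int) (y0 : Int) (x1 : Int) (y1 : Int) (mine : List (Int × Int)), Dom_varen_premik x0 y0 x1 y1 mine → Spec_varen_premik x0 y0 x1 y1 mine (varen_premik x0 y0 x1 y1 mine)

-- ===== LEMMAS AND PROOFS =====

-- A's flag-flipping fold over a list equals `init && !(l.any c)`.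
theorem pv_foldl_flag (c : Int → Bool) (l : List Int) :
    ∀ init : Bool,
      l.foldl (fun varno y => if c y then false else varno) init = (init && !(l.any c)) := by
  induction l with
  | nil => intro init; simp
  | cons x xs ih =>
    intro init
    rw [List.foldl_cons, ih, List.any_cons]
    by_cases h : c x = true
    · simp [h]
    · simp [h]

-- scanning cells of a vertical segment ↔ scanning mines with a range test
theorem pv_any_vert (x0 lo hi : Int) (mine : List (Int × Int)) :
    (PySem.List.pyRange lo (hi + 1) 1).any (fun y => mine.contains (x0, y)) =
      mine.any (fun m => m.1 == x0 && decide (lo ≤ m.2) && decide (m.2 ≤ hi)) := by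
  rw [Bool.eq_iff_iff]
  simp only [List.any_eq_true, PySem.List.mem_pyRange_one, List.contains_iff_mem,
    Bool.and_eq_true, beq_iff_eq, decide_eq_true_eq]
  constructor
  · rintro ⟨y, ⟨h1, h2⟩, hm⟩
    exact ⟨(x0, y), hm, ⟨rfl, h1⟩, by omega⟩
  · rintro ⟨⟨a, b⟩, hm, ⟨ha, h1⟩, h2⟩
    subst ha
    exact ⟨b, ⟨h1, by omega⟩, hm⟩

-- scanning cells of a horizontal segment ↔ scanning mines with a range test
theorem pv_any_horiz (y0 lo hi : Int) (mine : List (Int × Int)) :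
    (PySem.List.pyRange lo (hi + 1) 1).any (fun x => mine.contains (x, y0)) =
      mine.any (fun m => m.2 == y0 && decide (lo ≤ m.1) && decide (m.1 ≤ hi)) := by
  rw [Bool.eq_iff_iff]
  simp only [List.any_eq_true, PySem.List.mem_pyRange_one, List.contains_iff_mem,
    Bool.and_eq_true, beq_iff_eq, decide_eq_true_eq]
  constructor
  · rintro ⟨x, ⟨h1, h2⟩, hm⟩
    exact ⟨(x, y0), hm, ⟨rfl, h1⟩, by omega⟩
  · rintro ⟨⟨a, b⟩, hm, ⟨hb, h1⟩, h2⟩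
    subst hb
    exact ⟨a, ⟨h1, by omega⟩, hm⟩

-- ===== VERDICT (by name: the statement is the Claim_ definition above) =====
theorem varen_premik_spec : Claim_equal_varen_premik := by
  intro x0 y0 x1 y1 mine _
  unfold Spec_varen_premik varen_premik varen_premik_alt
  by_cases hx : x0 = x1
  · simp only [hx, beq_self_eq_true, if_true]
    by_cases hy : y0 < y1
    · simp only [hy, if_true, pv_foldl_flag, pv_any_vert, Bool.true_and]
    · simp only [hy, if_false, pv_foldl_flag, pv_any_vert, Bool.true_and]
  · simp only [beq_eq_false_iff_ne.mpr hx, Bool.false_eq_true, if_false]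
    by_cases hx' : x0 < x1
    · simp only [hx', if_true, pv_foldl_flag, pv_any_horiz, Bool.true_and]
    · simp only [hx', if_false, pv_foldl_flag, pv_any_horiz, Bool.true_and]
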